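-- pv_equiv track=rewrite | github.com/XLab-Tongji/AIOpsInfrastructure | transformer/bgl_preprocessor.py | get_lower_case_name
-- ===== SOURCE A (Python) =====
-- def get_lower_case_name(text):
--     """
--     修改的分词机制
--     Args:
--         text: 词语字符串
--     Returns:
--         列表，用于map操作
--     """
--
--     # 特化处理特殊情况
--     if text == "ALERTs":
--         return [text]
--     word_list = []
--     # 处理全部大写的情况，发现日志中的一些全大写单词写法带小写覆盖关键信息
--     for index, char in enumerate(text):
--         if not char.isupper():
--             break
--         else:
--             if index == len(text) - 1:
--                 return [text]
--     lst = []
--     for index, char in enumerate(text):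
--         if char.isupper() and index != 0:
--             word_list.append("".join(lst))
--             lst = []
--         lst.append(char)
--     word_list.append("".join(lst))
--     return word_list
-- ===== SOURCE B (Python) =====
-- def get_lower_case_name(text):
--     # special case kept verbatim
--     if text == "ALERTs":
--         return [text]
--     # all-uppercase (per-char isupper) words are kept whole
--     if text != "" and all(c.isupper() for c in text):
--         return [text]
--     # split off the maximal chunk starting at each word boundary, recursively
--     def split(s):
--         if s == "":
--             return [""]
--         head = s[0]
--         for ch in s[1:]:
--             if ch.isupper():
--                 break
--             head += ch
--         rest = s[len(head):]
--         if rest == "":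
--             return [head]
--         return [head] + split(rest)
--     return split(text)
-- ===== Notes on version B (the rewrite author's own statement) =====
-- stated objective: alternative
-- what changed: A's index-driven buffer-flush loop (flush the accumulator at each non-initial uppercase char) is replaced by a recursive splitter that peels off one maximal chunk (first char plus the following non-uppercase run) at a time; the two verbatim guards are kept.
import Mathlib
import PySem

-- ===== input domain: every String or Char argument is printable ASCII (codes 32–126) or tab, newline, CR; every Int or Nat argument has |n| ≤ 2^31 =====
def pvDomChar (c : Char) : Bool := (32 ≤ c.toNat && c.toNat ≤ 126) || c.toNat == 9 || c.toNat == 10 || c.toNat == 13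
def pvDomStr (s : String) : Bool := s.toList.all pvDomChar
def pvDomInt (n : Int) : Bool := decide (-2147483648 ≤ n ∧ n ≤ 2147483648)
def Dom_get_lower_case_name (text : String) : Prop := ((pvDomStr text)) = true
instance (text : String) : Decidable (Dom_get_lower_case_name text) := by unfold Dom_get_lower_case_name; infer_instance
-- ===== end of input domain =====

-- B replaces A's char-by-char buffer-flush loop with a recursive split into maximal chunks
-- (head char plus the following non-uppercase run); objective: alternative decomposition, same cost.

-- ===== PORT A =====
-- A's first loop: walks the string, breaks at the first non-uppercase char,
-- returns true (meaning `return [text]`) when the last index is reached while still uppercase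
def aUpperCheck : List Char → Nat → Nat → Bool
  | [], _, _ => false
  | c :: rest, i, n =>
      if !(PySem.Chars.isupper c) then false
      else if i = n - 1 then true
      else aUpperCheck rest (i + 1) n

-- A's second loop: state (word_list, lst); flush lst at each uppercase char with index ≠ 0
def aMainLoop : List Char → Nat → List String → List Char → List String × List Char
  | [], _, wl, lst => (wl, lst)
  | c :: rest, i, wl, lst =>
      if PySem.Chars.isupper c && i != 0 then
        aMainLoop rest (i + 1) (wl ++ [String.ofList lst]) [c]
      else
        aMainLoop rest (i + 1) wl (lst ++ [c])

def get_lower_case_name (text : String) : List String :=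
  if text == "ALERTs" then [text]
  else if aUpperCheck text.toList 0 text.toList.length then [text]
  else
    let r := aMainLoop text.toList 0 [] []
    r.1 ++ [String.ofList r.2]

-- ===== PORT B =====
-- Source B's `split`: first chunk = first char plus the following run of non-uppercase chars,
-- then recurse on the remainder `s[len(head):]`
def bSplit : List Char → List (List Char)
  | [] => [[]]
  | c :: r =>
      let head := c :: r.takeWhile (fun ch => !(PySem.Chars.isupper ch))
      let rest := (c :: r).drop head.length
      if rest = [] then [head] else head :: bSplit rest
termination_by s => s.length
decreasing_by
  simp only [List.length_drop, List.length_cons]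
  omega

def get_lower_case_name_alt (text : String) : List String :=
  if text == "ALERTs" then [text]
  else if !(text == "") && text.toList.all PySem.Chars.isupper then [text]
  else (bSplit text.toList).map String.ofList

-- ===== PRECONDITION & SPEC =====
def Spec_get_lower_case_name (text : String) (out : List String) : Prop := out = get_lower_case_name_alt text
instance (text : String) (out : List String) : Decidable (Spec_get_lower_case_name text out) := by unfold Spec_get_lower_case_name; infer_instance

-- ===== CLAIM (what is proved, stated in full; the proofs are below) =====
def Claim_equal_get_lower_case_name : Prop := ∀ (text : String), Dom_get_lower_case_name text → Spec_get_lower_case_name text (get_lower_case_name text)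

-- ===== LEMMAS AND PROOFS =====

theorem bSplit_nil : bSplit [] = [[]] := by rw [bSplit]

theorem drop_length_takeWhile (p : Char → Bool) (r : List Char) :
    r.drop (r.takeWhile p).length = r.dropWhile p := by
  induction r with
  | nil => simp
  | cons c t ih =>
    by_cases hc : p c
    · simpa [List.takeWhile_cons, List.dropWhile_cons, hc] using ih
    · simp [hc]

theorem bSplit_cons (c : Char) (r : List Char) :
    bSplit (c :: r) = (if r.dropWhile (fun ch => !(PySem.Chars.isupper ch)) = []
        then [c :: r.takeWhile (fun ch => !(PySem.Chars.isupper ch))]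
        else (c :: r.takeWhile (fun ch => !(PySem.Chars.isupper ch)))
              :: bSplit (r.dropWhile (fun ch => !(PySem.Chars.isupper ch)))) := by
  rw [bSplit]
  simp only [List.length_cons, List.drop_succ_cons, drop_length_takeWhile]

-- A's first loop decides exactly "nonempty and every char uppercase"
theorem aUpperCheck_eq (cs : List Char) :
    ∀ i n, n = i + cs.length →
    aUpperCheck cs i n = (!cs.isEmpty && cs.all PySem.Chars.isupper) := by
  induction cs with
  | nil => intro i n _; simp [aUpperCheck]
  | cons c rest ih =>
    intro i n h
    by_cases hc : PySem.Chars.isupper c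
    · cases rest with
      | nil =>
        have hl : i = n - 1 := by simp at h; omega
        simp [aUpperCheck, hc, hl]
      | cons d t =>
        have hne : ¬ (i = n - 1) := by simp at h; omega
        have hrec := ih (i + 1) n (by simp at h ⊢; omega)
        have hstep : aUpperCheck (c :: d :: t) i n = aUpperCheck (d :: t) (i + 1) n := by
          rw [aUpperCheck]; simp [hc, hne]
        rw [hstep, hrec]; simp [hc]
    · simp [aUpperCheck, hc]

-- A's main loop, run from any index ≥ 1, appends the pending chunk completed by the
-- following non-uppercase run, then the chunks of the remainder (= B's recursive split)
theorem aMainLoop_eq (rest : List Char) :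
    ∀ (i : Nat) (wl : List String) (lst : List Char), i ≠ 0 →
    (aMainLoop rest i wl lst).1 ++ [String.ofList (aMainLoop rest i wl lst).2]
      = wl ++ [String.ofList (lst ++ rest.takeWhile (fun ch => !(PySem.Chars.isupper ch)))]
          ++ (if rest.dropWhile (fun ch => !(PySem.Chars.isupper ch)) = [] then []
              else (bSplit (rest.dropWhile (fun ch => !(PySem.Chars.isupper ch)))).map String.ofList) := by
  induction rest with
  | nil => intro i wl lst hi; simp [aMainLoop]
  | cons c r ih =>
    intro i wl lst hi
    by_cases hc : PySem.Chars.isupper c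
    · have hcond : (PySem.Chars.isupper c && i != 0) = true := by simp [hc, hi]
      rw [show aMainLoop (c :: r) i wl lst
            = aMainLoop r (i + 1) (wl ++ [String.ofList lst]) [c] by simp [aMainLoop, hcond]]
      rw [ih (i + 1) _ _ (by omega)]
      have ht : (c :: r).takeWhile (fun ch => !(PySem.Chars.isupper ch)) = [] := by
        simp [hc]
      have hd : (c :: r).dropWhile (fun ch => !(PySem.Chars.isupper ch)) = c :: r := by
        simp [hc]
      rw [ht, hd]
      simp only [List.cons_ne_nil, if_false, bSplit_cons]
      split <;> simp
    · have hcond : (PySem.Chars.isupper c && i != 0) = false := by simp [hc]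
      rw [show aMainLoop (c :: r) i wl lst
            = aMainLoop r (i + 1) wl (lst ++ [c]) by simp [aMainLoop, hcond]]
      rw [ih (i + 1) _ _ (by omega)]
      simp [hc]

theorem main_eq (cs : List Char) :
    (aMainLoop cs 0 [] []).1 ++ [String.ofList (aMainLoop cs 0 [] []).2]
      = (bSplit cs).map String.ofList := by
  cases cs with
  | nil => simp [aMainLoop, bSplit_nil]
  | cons c r =>
    rw [show aMainLoop (c :: r) 0 [] [] = aMainLoop r 1 [] [c] by simp [aMainLoop]]
    rw [aMainLoop_eq r 1 [] [c] (by omega)]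
    rw [bSplit_cons]
    split <;> simp

theorem empty_iff (text : String) : (text == "") = text.toList.isEmpty := by
  by_cases h : text = ""
  · simp [h]
  · have h2 : text.toList ≠ [] := fun hn => h (by rw [← String.toList_inj]; simpa using hn)
    rw [beq_eq_false_iff_ne.mpr h, List.isEmpty_eq_false_iff.mpr h2]

-- ===== VERDICT (by name: the statement is the Claim_ definition above) =====
theorem get_lower_case_name_spec : Claim_equal_get_lower_case_name := by
  intro text _
  unfold Spec_get_lower_case_name get_lower_case_name get_lower_case_name_alt
  by_cases hA : text == "ALERTs"
  · simp [hA]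
  · simp only [hA, Bool.false_eq_true, if_false]
    have hg : aUpperCheck text.toList 0 text.toList.length
        = (!(text == "") && text.toList.all PySem.Chars.isupper) := by
      rw [aUpperCheck_eq text.toList 0 text.toList.length (by omega), empty_iff]
    rw [hg]
    split
    · rfl
    · exact main_eq text.toList
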